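-- pv_equiv track=rewrite | github.com/pypi-data/pypi-mirror-383 | packages/lunascope/lunascope-0.1.5-py3-none-any.whl/lunascope/components/anal.py | _tokenize_pair_line
-- ===== SOURCE A (Python) =====
-- def _tokenize_pair_line(line: str) -> list[str]:
--     # split on space/tab/'=' outside quotes; support "..." and '...' with backslash escapes
--     tokens, buf, q, esc = [], [], None, False
--     for ch in line:
--         if esc:
--             buf.append(ch); esc = False; continue
--         if q:
--             if ch == '\\': esc = True; continue
--             if ch == q: q = None; continue
--             buf.append(ch); continue
--         if ch in ('"', "'"): q = ch; continue
--         if ch in ' \t=':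
--             if buf: tokens.append(''.join(buf)); buf = []
--             continue
--         buf.append(ch)
--     if buf: tokens.append(''.join(buf))
--     return tokens
-- ===== SOURCE B (Python) =====
-- def _tokenize_pair_line(line: str) -> list[str]:
--     # index-based scanner: inner while consumes a quoted region, no q/esc flags
--     tokens = []
--     buf = []
--     i = 0
--     n = len(line)
--     while i < n:
--         ch = line[i]
--         if ch == '"' or ch == "'":
--             i += 1
--             while i < n:
--                 c = line[i]
--                 if c == '\\':
--                     if i + 1 < n:
--                         buf.append(line[i + 1])
--                     i += 2
--                 elif c == ch:
--                     i += 1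
--                     break
--                 else:
--                     buf.append(c)
--                     i += 1
--         elif ch in ' \t=':
--             if buf:
--                 tokens.append(''.join(buf))
--                 buf = []
--             i += 1
--         else:
--             buf.append(ch)
--             i += 1
--     if buf:
--         tokens.append(''.join(buf))
--     return tokens
-- ===== Notes on version B (the rewrite author's own statement) =====
-- stated objective: alternative
-- what changed: Replaces A's per-character state machine with q/esc flags by an index-based scanner whose nested inner loop consumes an entire quoted region (handling backslash escapes by lookahead) before returning to the outer split loop.
import Mathlib
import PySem

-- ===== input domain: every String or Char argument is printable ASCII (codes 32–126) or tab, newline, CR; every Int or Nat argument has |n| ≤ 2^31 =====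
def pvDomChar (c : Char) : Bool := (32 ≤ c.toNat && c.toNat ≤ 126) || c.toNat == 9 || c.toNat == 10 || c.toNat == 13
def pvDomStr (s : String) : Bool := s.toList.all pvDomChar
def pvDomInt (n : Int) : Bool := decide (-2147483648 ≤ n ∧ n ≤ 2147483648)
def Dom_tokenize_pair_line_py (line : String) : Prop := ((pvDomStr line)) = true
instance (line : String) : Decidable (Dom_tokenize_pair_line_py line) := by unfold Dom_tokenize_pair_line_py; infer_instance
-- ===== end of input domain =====

-- B replaces A's per-char state machine (q/esc flags) by an index-style scanner with a
-- nested loop that consumes a whole quoted region at once (objective: alternative decomposition).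

-- ===== PORT A =====
-- for-loop of A as structural recursion over the characters; state = (tokens, buf, q, esc)
def aLoop : List Char → List String → List Char → Option Char → Bool → List String
  | [], tokens, buf, _, _ =>
      if buf.isEmpty then tokens else tokens ++ [String.mk buf]
  | ch :: cs, tokens, buf, q, esc =>
      if esc then aLoop cs tokens (buf ++ [ch]) q false
      else
        match q with
        | some qc =>
            if ch == '\\' then aLoop cs tokens buf (some qc) true
            else if ch == qc then aLoop cs tokens buf none false
            else aLoop cs tokens (buf ++ [ch]) (some qc) false
        | none =>
            if ch == '"' || ch == '\'' then aLoop cs tokens buf (some ch) false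
            else if ch == ' ' || ch == '\t' || ch == '=' then
              aLoop cs (if buf.isEmpty then tokens else tokens ++ [String.mk buf]) [] none false
            else aLoop cs tokens (buf ++ [ch]) none false

def tokenize_pair_line_py (line : String) : List String :=
  aLoop line.toList [] [] none false

-- ===== PORT B =====
-- inner while loop of B: consume a quoted region (opened with quote qc), returning the
-- grown buffer and the remaining characters; a backslash appends the next char (if any)
-- and skips both.
def bQuoted : List Char → Char → List Char → List Char × List Char
  | [], _, buf => (buf, [])
  | c :: cs, qc, buf =>
      if c == '\\' then
        match cs with
        | [] => (buf, [])
        | d :: ds => bQuoted ds qc (buf ++ [d])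
      else if c == qc then (buf, cs)
      else bQuoted cs qc (buf ++ [c])

theorem bQuoted_len (cs : List Char) (qc : Char) (buf : List Char) :
    (bQuoted cs qc buf).2.length ≤ cs.length := by
  fun_induction bQuoted cs qc buf <;> simp_all <;> omega

-- outer while loop of B
def bLoop : List Char → List String → List Char → List String
  | [], tokens, buf =>
      if buf.isEmpty then tokens else tokens ++ [String.mk buf]
  | ch :: cs, tokens, buf =>
      if ch == '"' || ch == '\'' then
        bLoop (bQuoted cs ch buf).2 tokens (bQuoted cs ch buf).1
      else if ch == ' ' || ch == '\t' || ch == '=' then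
        bLoop cs (if buf.isEmpty then tokens else tokens ++ [String.mk buf]) []
      else bLoop cs tokens (buf ++ [ch])
termination_by cs => cs.length
decreasing_by
  · exact Nat.lt_succ_of_le (bQuoted_len cs ch buf)
  · simp
  · simp

def tokenize_pair_line_py_alt (line : String) : List String :=
  bLoop line.toList [] []

-- ===== PRECONDITION & SPEC =====
def Spec_tokenize_pair_line_py (line : String) (out : List String) : Prop := out = tokenize_pair_line_py_alt line
instance (line : String) (out : List String) : Decidable (Spec_tokenize_pair_line_py line out) := by unfold Spec_tokenize_pair_line_py; infer_instance

-- ===== CLAIM (what is proved, stated in full; the proofs are below) =====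
def Claim_equal_tokenize_pair_line_py : Prop := ∀ (line : String), Dom_tokenize_pair_line_py line → Spec_tokenize_pair_line_py line (tokenize_pair_line_py line)

-- ===== LEMMAS AND PROOFS =====

-- A's quoted-state run equals B's inner loop followed by A in neutral state.
theorem quoted_agree : ∀ (n : ℕ) (cs : List Char), cs.length ≤ n →
    ∀ (tokens : List String) (buf : List Char) (qc : Char),
    aLoop cs tokens buf (some qc) false
      = aLoop (bQuoted cs qc buf).2 tokens (bQuoted cs qc buf).1 none false := by
  intro n
  induction n with
  | zero =>
      intro cs h; intro tokens buf qc
      have : cs = [] := List.eq_nil_of_length_eq_zero (Nat.le_zero.mp h)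
      subst this; simp [aLoop, bQuoted]
  | succ n ih =>
      intro cs h tokens buf qc
      match cs with
      | [] => simp [aLoop, bQuoted]
      | c :: cs' =>
          simp only [List.length_cons, Nat.succ_le_succ_iff] at h
          by_cases hb : c = '\\'
          · subst hb
            match cs' with
            | [] => simp [aLoop, bQuoted]
            | d :: ds =>
                have hlen : ds.length ≤ n := by simp at h; omega
                have := ih ds hlen tokens (buf ++ [d]) qc
                simp only [aLoop, bQuoted, beq_self_eq_true, if_true, Bool.false_eq_true,
                  if_false]
                simpa using this
          · by_cases hq : c = qc
            · subst hq
              rw [bQuoted.eq_def]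
              simp [aLoop, hb]
            · rw [bQuoted.eq_def]
              simp only [aLoop, beq_iff_eq, if_neg hb, if_neg hq, Bool.false_eq_true,
                if_false]
              exact ih cs' (by omega) tokens (buf ++ [c]) qc

-- A in neutral state equals B's outer loop.
theorem neutral_agree : ∀ (n : ℕ) (cs : List Char), cs.length ≤ n →
    ∀ (tokens : List String) (buf : List Char),
    aLoop cs tokens buf none false = bLoop cs tokens buf := by
  intro n
  induction n with
  | zero =>
      intro cs h tokens buf
      have : cs = [] := List.eq_nil_of_length_eq_zero (Nat.le_zero.mp h)
      subst this; simp [aLoop, bLoop]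
  | succ n ih =>
      intro cs h tokens buf
      match cs with
      | [] => simp [aLoop, bLoop]
      | c :: cs' =>
          simp only [List.length_cons, Nat.succ_le_succ_iff] at h
          by_cases hq : c = '"' ∨ c = '\''
          · have hqb : (c == '"' || c == '\'') = true := by
              rcases hq with h1 | h1 <;> simp [h1]
            rw [aLoop, bLoop]
            simp only [hqb, if_true]
            rw [quoted_agree cs'.length cs' le_rfl tokens buf c]
            exact ih _ (Nat.le_trans (bQuoted_len cs' c buf) h) tokens _
          · have hqb : (c == '"' || c == '\'') = false := by
              push Not at hq; simp [hq.1, hq.2]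
            by_cases hd : c = ' ' ∨ c = '\t' ∨ c = '='
            · have hdb : (c == ' ' || c == '\t' || c == '=') = true := by
                rcases hd with h1 | h1 | h1 <;> simp [h1]
              rw [aLoop, bLoop]
              simp only [hqb, hdb, if_true, if_false, Bool.false_eq_true]
              exact ih cs' h _ []
            · have hdb : (c == ' ' || c == '\t' || c == '=') = false := by
                push Not at hd; simp [hd.1, hd.2.1, hd.2.2]
              rw [aLoop, bLoop]
              simp only [hqb, hdb, if_false, Bool.false_eq_true]
              exact ih cs' h tokens (buf ++ [c])

-- ===== VERDICT (by name: the statement is the Claim_ definition above) =====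
theorem tokenize_pair_line_py_spec : Claim_equal_tokenize_pair_line_py := by
  intro line _
  unfold Spec_tokenize_pair_line_py tokenize_pair_line_py tokenize_pair_line_py_alt
  exact neutral_agree line.toList.length line.toList le_rfl [] []
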